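-- pv_equiv track=rewrite | github.com/greivinlopez/coding-solutions | python/leetcode/problems_1300_1399/1383_maximum_performance_of_a_team.py | max_performance
-- ===== SOURCE A (Python) =====
-- import heapq
--
-- def max_performance(n, speed, efficiency, k):
--     mod = 10 ** 9 + 7
--     eng = []
--     for eff, spd in zip(efficiency, speed):
--         eng.append([eff, spd])
--     eng.sort(reverse = True)
--
--     res, speed = 0, 0
--     minHeap = []
--
--     for eff, spd in eng:
--         if len(minHeap) == k:
--             speed -= heapq.heappop(minHeap)
--         speed += spd
--         heapq.heappush(minHeap, spd)
--         res = max(res, eff * speed)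
--     return res % mod
-- ===== SOURCE B (Python) =====
-- def max_performance(n, speed, efficiency, k):
--     mod = 10 ** 9 + 7
--     res, total = 0, 0
--     team = []  # kept speeds, ascending
--     for eff, spd in sorted(zip(efficiency, speed), reverse=True):
--         if len(team) == k:
--             total -= team.pop(0)
--         i = 0
--         while i < len(team) and team[i] < spd:
--             i += 1
--         team.insert(i, spd)
--         total += spd
--         res = max(res, eff * total)
--     return res % mod
-- ===== Notes on version B (the rewrite author's own statement) =====
-- stated objective: simpler
-- what changed: Replaces the heapq min-heap by a plain ascending list of kept speeds maintained by positional insertion, so evicting the slowest member is popping the head instead of heappop.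
import Mathlib
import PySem

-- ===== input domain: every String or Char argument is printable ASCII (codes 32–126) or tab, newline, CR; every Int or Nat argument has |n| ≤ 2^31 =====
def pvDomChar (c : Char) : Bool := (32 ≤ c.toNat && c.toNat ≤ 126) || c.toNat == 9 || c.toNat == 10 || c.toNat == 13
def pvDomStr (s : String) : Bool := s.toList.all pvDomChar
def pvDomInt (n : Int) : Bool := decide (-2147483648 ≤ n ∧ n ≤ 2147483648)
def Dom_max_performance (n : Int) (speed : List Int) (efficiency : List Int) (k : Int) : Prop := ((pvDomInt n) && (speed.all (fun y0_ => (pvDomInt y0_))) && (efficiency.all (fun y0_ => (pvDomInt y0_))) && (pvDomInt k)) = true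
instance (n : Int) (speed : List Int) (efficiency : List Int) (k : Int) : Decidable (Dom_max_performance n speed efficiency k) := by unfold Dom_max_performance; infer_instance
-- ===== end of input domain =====

-- B replaces A's heapq min-heap by a plain ascending list of kept speeds (positional
-- insertion; evicting the slowest member = popping the head); objective: simpler.

-- ===== PORT A =====
-- heapq is modelled by its observable contract (exact for everything A reads from it:
-- the length and the popped values): heappush appends, heappop removes one minimal element.
def pvHeapPop (h : List Int) : Int × List Int :=
  match h with
  | [] => (0, [])            -- Python heappop raises IndexError here; excluded by Pre_
  | [x] => (x, [])
  | x :: xs =>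
      let p := pvHeapPop xs
      if x ≤ p.1 then (x, xs) else (p.1, x :: p.2)

-- one iteration of A's loop; state = (res, speed, minHeap)
def pvStepA (k : Int) (st : Int × Int × List Int) (e : Int × Int) : Int × Int × List Int :=
  let s1 := if (st.2.2.length : Int) = k then
              (st.2.1 - (pvHeapPop st.2.2).1, (pvHeapPop st.2.2).2)
            else (st.2.1, st.2.2)
  let spd := s1.1 + e.2
  let heap := s1.2 ++ [e.2]
  (max st.1 (e.1 * spd), spd, heap)

def max_performance (n : Int) (speed : List Int) (efficiency : List Int) (k : Int) : Int :=
  let md : Int := 10 ^ 9 + 7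
  let eng := (efficiency.zip speed).foldl (fun acc p => acc ++ [p]) []
  let eng := PySem.List.sorted2 eng Prod.fst Prod.snd true
  let st := eng.foldl (pvStepA k) (0, 0, [])
  PySem.Int.mod st.1 md

-- ===== PORT B =====
-- the while-loop of Source B: skip the elements < x, insert x before the first ≥ x
def pvInsertAsc (x : Int) : List Int → List Int
  | [] => [x]
  | h :: t => if h < x then h :: pvInsertAsc x t else x :: h :: t

-- one iteration of B's loop; state = (res, total, team)
def pvStepB (k : Int) (st : Int × Int × List Int) (e : Int × Int) : Int × Int × List Int :=
  let s1 := if (st.2.2.length : Int) = k then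
              (st.2.1 - st.2.2.headD 0, st.2.2.tail)   -- team.pop(0); [] raises, excluded by Pre_
            else (st.2.1, st.2.2)
  let team := pvInsertAsc e.2 s1.2
  let tot := s1.1 + e.2
  (max st.1 (e.1 * tot), tot, team)

def max_performance_alt (n : Int) (speed : List Int) (efficiency : List Int) (k : Int) : Int :=
  let md : Int := 10 ^ 9 + 7
  let st := (PySem.List.sorted2 (efficiency.zip speed) Prod.fst Prod.snd true).foldl (pvStepB k) (0, 0, [])
  PySem.Int.mod st.1 md

-- ===== PRECONDITION & SPEC =====
-- Pre_ excludes exactly k = 0 together with a nonempty engineer list: there Python A's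
-- heappop on the empty heap raises IndexError (and B's team.pop(0) raises too).
def Pre_max_performance (n : Int) (speed : List Int) (efficiency : List Int) (k : Int) : Prop :=
  k ≠ 0 ∨ speed = [] ∨ efficiency = []
instance (n : Int) (speed : List Int) (efficiency : List Int) (k : Int) : Decidable (Pre_max_performance n speed efficiency k) := by unfold Pre_max_performance; infer_instance
def pvWitness_max_performance : Int × List Int × List Int × Int := (2, [5, 3], [4, 7], 1)

def Spec_max_performance (n : Int) (speed : List Int) (efficiency : List Int) (k : Int) (out : Int) : Prop := out = max_performance_alt n speed efficiency k
instance (n : Int) (speed : List Int) (efficiency : List Int) (k : Int) (out : Int) : Decidable (Spec_max_performance n speed efficiency k out) := by unfold Spec_max_performance; infer_instance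

-- ===== CLAIM (what is proved, stated in full; the proofs are below) =====
def Claim_equal_max_performance : Prop := ∀ (n : Int) (speed : List Int) (efficiency : List Int) (k : Int), Dom_max_performance n speed efficiency k → Pre_max_performance n speed efficiency k → Spec_max_performance n speed efficiency k (max_performance n speed efficiency k)

-- ===== LEMMAS AND PROOFS =====

theorem pvHeapPop_cons_perm (h : List Int) (hne : h ≠ []) :
    ((pvHeapPop h).1 :: (pvHeapPop h).2).Perm h := by
  induction h with
  | nil => simp at hne
  | cons x xs ih =>
    cases xs with
    | nil => simp [pvHeapPop]
    | cons y ys =>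
      simp only [pvHeapPop]
      split
      · exact List.Perm.refl _
      · exact (List.Perm.swap x _ _).trans ((ih (by simp)).cons x)

theorem pvHeapPop_min (h : List Int) (hne : h ≠ []) :
    ∀ x ∈ h, (pvHeapPop h).1 ≤ x := by
  induction h with
  | nil => simp at hne
  | cons a as ih =>
    cases as with
    | nil => simp [pvHeapPop]
    | cons y ys =>
      intro x hx
      simp only [pvHeapPop]
      rcases List.mem_cons.mp hx with rfl | hx
      · split <;> [exact le_refl _; omega]
      · have := ih (by simp) x hx
        split <;> omega

theorem pvInsertAsc_perm (x : Int) (l : List Int) : (pvInsertAsc x l).Perm (x :: l) := by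
  induction l with
  | nil => simp [pvInsertAsc]
  | cons h t ih =>
    simp only [pvInsertAsc]
    split
    · exact (ih.cons h).trans (List.Perm.swap x h t)
    · exact List.Perm.refl _

theorem pvInsertAsc_sorted (x : Int) (l : List Int) (hs : l.Sorted (· ≤ ·)) :
    (pvInsertAsc x l).Sorted (· ≤ ·) := by
  induction l with
  | nil => exact List.pairwise_singleton _ x
  | cons h t ih =>
    rw [List.sorted_cons] at hs
    simp only [pvInsertAsc]
    split
    · rename_i hlt
      rw [List.sorted_cons]
      refine ⟨?_, ih hs.2⟩
      intro b hb
      have := (pvInsertAsc_perm x t).mem_iff.mp hb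
      rcases List.mem_cons.mp this with rfl | hb'
      · omega
      · exact hs.1 b hb'
    · rename_i hge
      rw [List.sorted_cons]
      exact ⟨fun b hb => by
        rcases List.mem_cons.mp hb with rfl | hb'
        · omega
        · have := hs.1 b hb'; omega, List.sorted_cons.mpr hs⟩

-- the loop invariant: equal res, equal running sums, team is the heap sorted
theorem pvStep_inv (k : Int) (hk : k ≠ 0) (e : Int × Int) (a b : Int × Int × List Int)
    (h1 : a.1 = b.1) (h2 : a.2.1 = b.2.1) (h3 : a.2.2.Perm b.2.2) (h4 : b.2.2.Sorted (· ≤ ·)) :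
    (pvStepA k a e).1 = (pvStepB k b e).1 ∧ (pvStepA k a e).2.1 = (pvStepB k b e).2.1 ∧
    (pvStepA k a e).2.2.Perm (pvStepB k b e).2.2 ∧ (pvStepB k b e).2.2.Sorted (· ≤ ·) := by
  have hlen : a.2.2.length = b.2.2.length := h3.length_eq
  simp only [pvStepA, pvStepB, hlen]
  by_cases hg : (b.2.2.length : Int) = k
  · -- eviction branch: both lists are nonempty and the popped values agree
    have hneb : b.2.2 ≠ [] := by
      intro hnil; rw [hnil] at hg; simp at hg; omega
    have hnea : a.2.2 ≠ [] := by
      intro hnil; have := hlen; rw [hnil] at this; simp at this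
      exact hneb (List.eq_nil_of_length_eq_zero this.symm)
    obtain ⟨hb, tb, hbt⟩ := List.exists_cons_of_ne_nil hneb
    have hm : (pvHeapPop a.2.2).1 = hb := by
      have hmem : (pvHeapPop a.2.2).1 ∈ a.2.2 :=
        (pvHeapPop_cons_perm a.2.2 hnea).subset (by simp)
      have hmemb : (pvHeapPop a.2.2).1 ∈ b.2.2 := h3.subset hmem
      have hhbmem : hb ∈ a.2.2 := h3.symm.subset (by rw [hbt]; simp)
      have h1' : (pvHeapPop a.2.2).1 ≤ hb := pvHeapPop_min a.2.2 hnea hb hhbmem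
      have h2' : hb ≤ (pvHeapPop a.2.2).1 := by
        rw [hbt] at hmemb h4
        rcases List.mem_cons.mp hmemb with heq | hmem'
        · omega
        · exact (List.sorted_cons.mp h4).1 _ hmem'
      omega
    have hrest : (pvHeapPop a.2.2).2.Perm tb := by
      have hp := pvHeapPop_cons_perm a.2.2 hnea
      rw [hm] at hp
      have : (hb :: (pvHeapPop a.2.2).2).Perm (hb :: tb) := hp.trans (h3.trans (by rw [hbt]))
      exact this.cons_inv
    have htail : b.2.2.tail = tb := by rw [hbt]; rfl
    have hhead : b.2.2.headD 0 = hb := by rw [hbt]; rfl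
    simp only [hg, if_pos rfl, hm, hhead, htail]
    refine ⟨by simp [h1, h2], by simp [h2], ?_, ?_⟩
    · exact (List.perm_append_singleton e.2 _).trans
        ((hrest.cons e.2).trans (pvInsertAsc_perm e.2 tb).symm)
    · exact pvInsertAsc_sorted e.2 tb (by rw [hbt] at h4; exact (List.sorted_cons.mp h4).2)
  · simp only [hg, if_neg hg, if_false]
    refine ⟨by simp [h1, h2], by simp [h2], ?_, pvInsertAsc_sorted e.2 b.2.2 h4⟩
    exact (List.perm_append_singleton e.2 _).trans
      ((h3.cons e.2).trans (pvInsertAsc_perm e.2 b.2.2).symm)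

theorem pvFold_inv (k : Int) (hk : k ≠ 0) (l : List (Int × Int)) (a b : Int × Int × List Int)
    (h1 : a.1 = b.1) (h2 : a.2.1 = b.2.1) (h3 : a.2.2.Perm b.2.2) (h4 : b.2.2.Sorted (· ≤ ·)) :
    (l.foldl (pvStepA k) a).1 = (l.foldl (pvStepB k) b).1 := by
  induction l generalizing a b with
  | nil => simpa using h1
  | cons e t ih =>
    obtain ⟨q1, q2, q3, q4⟩ := pvStep_inv k hk e a b h1 h2 h3 h4
    exact ih _ _ q1 q2 q3 q4

theorem pvEngBuild (l : List (Int × Int)) :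
    l.foldl (fun acc p => acc ++ [p]) [] = l := by
  simpa using PySem.List.foldl_append_singleton l ([] : List (Int × Int))

-- ===== VERDICT (by name: the statement is the Claim_ definition above) =====
theorem max_performance_spec : Claim_equal_max_performance := by
  intro n speed efficiency k _ hpre
  unfold Spec_max_performance max_performance max_performance_alt
  rcases hpre with hk | hsp | hef
  · simp only [pvEngBuild]
    congr 1
    exact pvFold_inv k hk _ _ _ rfl rfl (List.Perm.refl _) List.sorted_nil
  · subst hsp; simp [List.zip_nil_right, PySem.List.sorted2]
  · subst hef; simp [List.zip_nil_left, PySem.List.sorted2]
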